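-- pv_equiv track=rewrite | github.com/elkhaligy/LeetCode | 1. Easy/(12) Dec 2024/Week 1/1. 1346. Check If N and Its Double Exist.py | checkIfExistSol2
-- ===== SOURCE A (Python) =====
-- def checkIfExistSol2(arr: list[int]) -> bool:
--     arrSet = set(arr)
--     zeroCount = 0
--
--     for num in arr:
--         if num == 0:
--             zeroCount += 1
--     if zeroCount > 1:
--         return True
--
--     for num in arrSet:
--         if num != 0 and num * 2 in arrSet:
--             return True
--     return False
-- ===== SOURCE B (Python) =====
-- def checkIfExistSol2(arr: list[int]) -> bool:
--     seen = set()
--     for num in arr: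
--         if 2 * num in seen or (num % 2 == 0 and num // 2 in seen):
--             return True
--         seen.add(num)
--     return False
-- ===== Notes on version B (the rewrite author's own statement) =====
-- stated objective: idiomatic
-- what changed: Replaces A's three phases (build full set, count zeros, scan set for doubles) with one pass that keeps a growing 'seen' set and checks each element against its double and (if even) its half among earlier elements, returning early; the separate zero-counting loop disappears.
import Mathlib
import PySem

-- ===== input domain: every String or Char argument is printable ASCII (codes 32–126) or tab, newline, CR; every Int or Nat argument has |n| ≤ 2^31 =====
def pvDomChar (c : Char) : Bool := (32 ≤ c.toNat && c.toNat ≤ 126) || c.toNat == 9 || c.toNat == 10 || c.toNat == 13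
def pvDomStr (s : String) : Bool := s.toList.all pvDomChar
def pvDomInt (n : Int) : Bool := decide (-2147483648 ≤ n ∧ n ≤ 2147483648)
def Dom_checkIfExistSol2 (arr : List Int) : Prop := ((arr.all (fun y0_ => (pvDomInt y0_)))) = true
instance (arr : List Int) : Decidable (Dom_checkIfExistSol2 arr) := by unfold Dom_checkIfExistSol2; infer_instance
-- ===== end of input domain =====

-- B replaces A's build-set/count-zeros/scan-set phases with a single early-returning
-- pass over arr that maintains a growing 'seen' set (idiomatic; same O(n) cost).

-- ===== PORT A =====
-- for num in arr: if num == 0: zeroCount += 1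
def pvZeroCount (arr : List Int) : Int :=
  arr.foldl (fun zeroCount num => if num = 0 then zeroCount + 1 else zeroCount) 0

-- for num in arrSet: if num != 0 and num * 2 in arrSet: return True / return False
-- (the result is order-independent, so iterating the Set's list is exact)
def pvScan (arrSet : PySem.Set Int) : List Int → Bool
  | [] => false
  | num :: rest =>
    if num ≠ 0 && PySem.Set.contains arrSet (num * 2) then true else pvScan arrSet rest

def checkIfExistSol2 (arr : List Int) : Bool :=
  let arrSet := PySem.Set.ofList arr
  if pvZeroCount arr > 1 then true
  else pvScan arrSet arrSet

-- ===== PORT B =====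
-- for num in arr: if 2*num in seen or (num % 2 == 0 and num // 2 in seen): return True
--                 seen.add(num)
def pvSeenLoop (seen : PySem.Set Int) : List Int → Bool
  | [] => false
  | num :: rest =>
    if PySem.Set.contains seen (2 * num)
        || (PySem.Int.mod num 2 == 0 && PySem.Set.contains seen (PySem.Int.floordiv num 2)) then
      true
    else pvSeenLoop (PySem.Set.add seen num) rest

def checkIfExistSol2_alt (arr : List Int) : Bool := pvSeenLoop PySem.Set.empty arr

-- ===== PRECONDITION & SPEC =====
def Spec_checkIfExistSol2 (arr : List Int) (out : Bool) : Prop := out = checkIfExistSol2_alt arr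
instance (arr : List Int) (out : Bool) : Decidable (Spec_checkIfExistSol2 arr out) := by unfold Spec_checkIfExistSol2; infer_instance

-- ===== CLAIM (what is proved, stated in full; the proofs are below) =====
def Claim_equal_checkIfExistSol2 : Prop := ∀ (arr : List Int), Dom_checkIfExistSol2 arr → Spec_checkIfExistSol2 arr (checkIfExistSol2 arr)

-- ===== LEMMAS AND PROOFS =====

-- the common characterisation: two zeros, or a nonzero element together with its double
def pvHasPair (arr : List Int) : Prop :=
  2 ≤ arr.count 0 ∨ ∃ x ∈ arr, x ≠ 0 ∧ x * 2 ∈ arr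

lemma pvZeroCount_go (arr : List Int) : ∀ z : Int,
    arr.foldl (fun zeroCount num => if num = 0 then zeroCount + 1 else zeroCount) z
      = z + (arr.count 0 : Int) := by
  induction arr with
  | nil => simp
  | cons a l ih =>
    intro z
    by_cases h : a = 0 <;> simp [h, ih, List.count_cons, eq_comm] <;> push_cast <;> ring

lemma pvScan_iff (s : PySem.Set Int) (l : List Int) :
    pvScan s l = true ↔ ∃ x ∈ l, x ≠ 0 ∧ (x * 2) ∈ s := by
  induction l with
  | nil => simp [pvScan]
  | cons a l ih =>
    by_cases h : a = 0 <;> by_cases hm : (a * 2) ∈ s <;>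
      simp [pvScan, h, hm, ih] <;> tauto

lemma pvA_iff (arr : List Int) : checkIfExistSol2 arr = true ↔ pvHasPair arr := by
  unfold checkIfExistSol2 pvHasPair
  simp only [pvZeroCount, pvZeroCount_go, zero_add]
  by_cases h2 : 2 ≤ arr.count 0
  · have : (1 : Int) < (arr.count 0 : Int) := by exact_mod_cast h2
    simp [this, h2]
  · have : ¬ (1 : Int) < (arr.count 0 : Int) := by
      simp only [not_lt]; exact_mod_cast Nat.lt_succ_iff.mp (Nat.lt_of_not_le h2)
    simp [this, h2, pvScan_iff, PySem.Set.mem_ofList]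

lemma pvSeenLoop_step (s : PySem.Set Int) (a : Int) (l : List Int) :
    pvSeenLoop s (a :: l) = true ↔
      (2 * a ∈ s ∨ (2 ∣ a ∧ a / 2 ∈ s)) ∨ pvSeenLoop (PySem.Set.add s a) l = true := by
  by_cases h1 : 2 * a ∈ s <;> by_cases h2 : 2 ∣ a <;> by_cases h3 : a / 2 ∈ s <;>
    simp [pvSeenLoop, h1, h2, h3]

-- the invariant of B's single pass
lemma pvSeenLoop_iff (l : List Int) : ∀ s : PySem.Set Int,
    pvSeenLoop s l = true ↔
      ∃ l₁ x l₂, l = l₁ ++ x :: l₂ ∧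
        ((2 * x ∈ s ∨ 2 * x ∈ l₁) ∨ (2 ∣ x ∧ (x / 2 ∈ s ∨ x / 2 ∈ l₁))) := by
  induction l with
  | nil =>
    intro s
    constructor
    · intro h; simp [pvSeenLoop] at h
    · rintro ⟨l₁, x, l₂, h, -⟩; exact absurd h (by simp)
  | cons a l ih =>
    intro s
    rw [pvSeenLoop_step, ih]
    constructor
    · rintro (h | ⟨l₁, x, l₂, hl, hx⟩)
      · refine ⟨[], a, l, by simp, ?_⟩
        rcases h with h | ⟨h1, h2⟩
        · exact Or.inl (Or.inl h)
        · exact Or.inr ⟨h1, Or.inl h2⟩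
      · refine ⟨a :: l₁, x, l₂, by simp [hl], ?_⟩
        rcases hx with (h | h) | ⟨h1, h2 | h2⟩
        · rcases (PySem.Set.mem_add s a (2 * x)).mp h with h' | h'
          · exact Or.inl (Or.inl h')
          · exact Or.inl (Or.inr (by simp [h']))
        · exact Or.inl (Or.inr (by simp [h]))
        · rcases (PySem.Set.mem_add s a (x / 2)).mp h2 with h' | h'
          · exact Or.inr ⟨h1, Or.inl h'⟩
          · exact Or.inr ⟨h1, Or.inr (by simp [h'])⟩
        · exact Or.inr ⟨h1, Or.inr (by simp [h2])⟩
    · rintro ⟨l₁, x, l₂, hl, hx⟩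
      cases l₁ with
      | nil =>
        simp only [List.nil_append, List.cons.injEq] at hl
        obtain ⟨rfl, rfl⟩ := hl
        left
        rcases hx with (h | h) | ⟨h1, h2 | h2⟩
        · exact Or.inl h
        · cases h
        · exact Or.inr ⟨h1, h2⟩
        · cases h2
      | cons b l₁' =>
        simp only [List.cons_append, List.cons.injEq] at hl
        obtain ⟨rfl, hl⟩ := hl
        right
        refine ⟨l₁', x, l₂, hl, ?_⟩
        rcases hx with (h | h) | ⟨h1, h2 | h2⟩
        · exact Or.inl (Or.inl ((PySem.Set.mem_add s a (2 * x)).mpr (Or.inl h)))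
        · rcases List.mem_cons.mp h with h' | h'
          · exact Or.inl (Or.inl ((PySem.Set.mem_add s a (2 * x)).mpr (Or.inr h')))
          · exact Or.inl (Or.inr h')
        · exact Or.inr ⟨h1, Or.inl ((PySem.Set.mem_add s a (x / 2)).mpr (Or.inl h2))⟩
        · rcases List.mem_cons.mp h2 with h' | h'
          · exact Or.inr ⟨h1, Or.inl ((PySem.Set.mem_add s a (x / 2)).mpr (Or.inr h'))⟩
          · exact Or.inr ⟨h1, Or.inr h'⟩

lemma pvCountTwo {l : List Int} (h : 2 ≤ l.count 0) :
    ∃ l₁ l₂, l = l₁ ++ (0 : Int) :: l₂ ∧ (0 : Int) ∈ l₁ := by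
  induction l with
  | nil => simp at h
  | cons a l ih =>
    by_cases ha : a = 0
    · subst ha
      have h1 : 1 ≤ l.count 0 := by rw [List.count_cons_self] at h; omega
      obtain ⟨s, t, hst⟩ := List.append_of_mem (List.count_pos_iff.mp h1)
      exact ⟨0 :: s, t, by simp [hst], by simp⟩
    · have h' : 2 ≤ l.count 0 := by simpa [List.count_cons, ha] using h
      obtain ⟨l₁, l₂, hl, hm⟩ := ih h'
      exact ⟨a :: l₁, l₂, by simp [hl], List.mem_cons_of_mem _ hm⟩

lemma pvSplitTwo {l : List Int} {a b : Int} (hne : a ≠ b) (ha : a ∈ l) (hb : b ∈ l) :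
    ∃ l₁ x l₂, l = l₁ ++ x :: l₂ ∧ ((x = a ∧ b ∈ l₁) ∨ (x = b ∧ a ∈ l₁)) := by
  induction l with
  | nil => simp at ha
  | cons c l ih =>
    by_cases hca : c = a
    · subst hca
      have hb' : b ∈ l := by
        rcases List.mem_cons.mp hb with h | h
        · exact absurd h.symm hne
        · exact h
      obtain ⟨s, t, hst⟩ := List.append_of_mem hb'
      exact ⟨c :: s, b, t, by simp [hst], Or.inr ⟨rfl, by simp⟩⟩
    · by_cases hcb : c = b
      · subst hcb
        have ha' : a ∈ l := by
          rcases List.mem_cons.mp ha with h | h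
          · exact absurd h hne
          · exact h
        obtain ⟨s, t, hst⟩ := List.append_of_mem ha'
        exact ⟨c :: s, a, t, by simp [hst], Or.inl ⟨rfl, by simp⟩⟩
      · have ha' : a ∈ l := by
          rcases List.mem_cons.mp ha with h | h
          · exact absurd h.symm hca
          · exact h
        have hb' : b ∈ l := by
          rcases List.mem_cons.mp hb with h | h
          · exact absurd h.symm hcb
          · exact h
        obtain ⟨l₁, x, l₂, hl, hx⟩ := ih ha' hb'
        refine ⟨c :: l₁, x, l₂, by simp [hl], ?_⟩
        rcases hx with ⟨h1, h2⟩ | ⟨h1, h2⟩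
        · exact Or.inl ⟨h1, List.mem_cons_of_mem _ h2⟩
        · exact Or.inr ⟨h1, List.mem_cons_of_mem _ h2⟩

lemma pvB_iff (arr : List Int) : checkIfExistSol2_alt arr = true ↔ pvHasPair arr := by
  unfold checkIfExistSol2_alt pvHasPair
  rw [pvSeenLoop_iff]
  constructor
  · rintro ⟨l₁, x, l₂, hl, hx⟩
    have hxmem : x ∈ arr := by rw [hl]; simp
    have hmem : ∀ y ∈ l₁, y ∈ arr := fun y hy => by rw [hl]; simp [hy]
    rcases hx with (h | h) | ⟨h1, h2 | h2⟩
    · simp [PySem.Set.empty] at h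
    · by_cases hx0 : x = 0
      · subst hx0
        left
        have h0 : (0 : Int) ∈ l₁ := by simpa using h
        obtain ⟨s, t, hst⟩ := List.append_of_mem h0
        rw [hl, hst]
        simp [List.count_append, List.count_cons]
        omega
      · right
        exact ⟨x, hxmem, hx0, by rw [mul_comm]; exact hmem _ h⟩
    · simp [PySem.Set.empty] at h2
    · obtain ⟨k, hk⟩ := h1
      by_cases hx0 : x = 0
      · subst hx0
        left
        have h0 : (0 : Int) ∈ l₁ := by simpa using h2
        obtain ⟨s, t, hst⟩ := List.append_of_mem h0
        rw [hl, hst]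
        simp [List.count_append, List.count_cons]
        omega
      · right
        refine ⟨x / 2, hmem _ h2, ?_, ?_⟩
        · intro h0; apply hx0; omega
        · have hdd : x / 2 * 2 = x := by omega
          rw [hdd]; exact hxmem
  · rintro (h | ⟨x, hx, hx0, hdx⟩)
    · obtain ⟨l₁, l₂, hl, hm⟩ := pvCountTwo h
      exact ⟨l₁, 0, l₂, hl, Or.inl (Or.inr (by simpa using hm))⟩
    · have hne : x ≠ x * 2 := by intro h'; omega
      obtain ⟨l₁, y, l₂, hl, hy⟩ := pvSplitTwo hne hx hdx
      refine ⟨l₁, y, l₂, hl, ?_⟩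
      rcases hy with ⟨rfl, h2⟩ | ⟨rfl, h2⟩
      · exact Or.inl (Or.inr (by rwa [mul_comm] at h2))
      · refine Or.inr ⟨⟨x, by ring⟩, Or.inr ?_⟩
        have hdd : x * 2 / 2 = x := by omega
        rwa [hdd]

-- ===== VERDICT (by name: the statement is the Claim_ definition above) =====
theorem checkIfExistSol2_spec : Claim_equal_checkIfExistSol2 := by
  intro arr _
  unfold Spec_checkIfExistSol2
  exact Bool.eq_iff_iff.mpr ((pvA_iff arr).trans (pvB_iff arr).symm)
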